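-- pv_equiv track=rewrite | github.com/rerisingstar/AlgorithmDesignLab | Exp3_SetCover.py | cal_f
-- ===== SOURCE A (Python) =====
-- def cal_f(X, F):
--     max_num = 0
--     max_e = None
--     for e in X:
--         show_times = 0
--         for C in F:
--             if e in C:
--                 show_times += 1
--         if show_times > max_num:
--             max_num = show_times
--             max_e = e
--     return max_num
-- ===== SOURCE B (Python) =====
-- def cal_f(X, F):
--     count = {}
--     for C in F:
--         for e in set(C):
--             count[e] = count.get(e, 0) + 1
--     best = 0
--     for e in X:
--         c = count.get(e, 0)
--         if c > best:
--             best = c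
--     return best
-- ===== Notes on version B (the rewrite author's own statement) =====
-- stated objective: faster
-- what changed: Instead of rescanning all of F for every element of X (nested membership loops), B builds a frequency histogram of elements in one pass over F and then takes the maximum of histogram lookups over X.
import Mathlib
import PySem

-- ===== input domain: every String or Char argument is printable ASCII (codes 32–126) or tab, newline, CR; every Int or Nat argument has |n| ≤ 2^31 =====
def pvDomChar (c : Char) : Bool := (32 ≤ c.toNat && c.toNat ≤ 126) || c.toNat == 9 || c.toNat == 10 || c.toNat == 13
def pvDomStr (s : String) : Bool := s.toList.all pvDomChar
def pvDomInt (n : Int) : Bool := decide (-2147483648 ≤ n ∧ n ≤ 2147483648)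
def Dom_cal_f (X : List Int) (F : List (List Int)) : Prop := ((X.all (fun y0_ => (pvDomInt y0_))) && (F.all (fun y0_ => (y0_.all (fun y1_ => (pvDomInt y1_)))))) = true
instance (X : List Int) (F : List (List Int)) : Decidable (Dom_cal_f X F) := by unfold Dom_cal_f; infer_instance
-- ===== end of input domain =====

-- B replaces A's nested rescan of F per X-element by a one-pass histogram over F plus a max pass over X (return value only).

-- ===== PORT A =====
def cal_f (X : List Int) (F : List (List Int)) : Int :=
  (X.foldl (fun acc e =>
      let show_times := F.foldl (fun s C => if e ∈ C then s + 1 else s) (0 : Int)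
      if show_times > acc.1 then (show_times, some e) else acc)
    ((0 : Int), (none : Option Int))).1

-- ===== PORT B =====
def cal_f_alt (X : List Int) (F : List (List Int)) : Int :=
  let count := F.foldl (fun d C =>
      (PySem.Set.ofList C).foldl (fun d e => d.insert e (d.getD e 0 + 1)) d)
    (PySem.Dict.empty : PySem.Dict Int Int)
  X.foldl (fun best e =>
      let c := count.getD e 0
      if c > best then c else best) 0

-- ===== PRECONDITION & SPEC =====
def Spec_cal_f (X : List Int) (F : List (List Int)) (out : Int) : Prop := out = cal_f_alt X F
instance (X : List Int) (F : List (List Int)) (out : Int) : Decidable (Spec_cal_f X F out) := by unfold Spec_cal_f; infer_instance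

-- ===== CLAIM (what is proved, stated in full; the proofs are below) =====
def Claim_equal_cal_f : Prop := ∀ (X : List Int) (F : List (List Int)), Dom_cal_f X F → Spec_cal_f X F (cal_f X F)

-- ===== LEMMAS AND PROOFS =====

-- A's inner loop counts the sets of F that contain e.
theorem cal_f_inner_count (e : Int) (F : List (List Int)) (s : Int) :
    F.foldl (fun s C => if e ∈ C then s + 1 else s) s
      = s + ((F.countP (fun C => decide (e ∈ C)) : Nat) : Int) := by
  induction F generalizing s with
  | nil => simp
  | cons C F ih =>
    simp only [List.foldl_cons, List.countP_cons]
    by_cases h : e ∈ C <;>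
      simp only [h, if_true, if_false, decide_true, decide_false, ih] <;>
      push_cast <;> ring

-- B's histogram records, for every e, how many sets of F contain it.
theorem cal_f_hist_count (e : Int) (F : List (List Int)) (d : PySem.Dict Int Int) :
    (F.foldl (fun d C =>
        (PySem.Set.ofList C).foldl (fun d e => d.insert e (d.getD e 0 + 1)) d) d).getD e 0
      = d.getD e 0 + ((F.countP (fun C => decide (e ∈ C)) : Nat) : Int) := by
  induction F generalizing d with
  | nil => simp
  | cons C F ih =>
    simp only [List.foldl_cons, List.countP_cons, ih]
    rw [PySem.Dict.getD_foldl_insert_add_one]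
    have hc : (PySem.Set.ofList C).count e = if e ∈ C then 1 else 0 := by
      by_cases h : e ∈ C
      · rw [if_pos h]
        exact List.count_eq_one_of_mem (PySem.Set.nodup_ofList C)
          ((PySem.Set.mem_ofList C e).mpr h)
      · rw [if_neg h]
        exact List.count_eq_zero.mpr (fun hm => h ((PySem.Set.mem_ofList C e).mp hm))
    by_cases h : e ∈ C <;>
      simp only [h, if_true, if_false, decide_true, decide_false] at hc ⊢ <;>
      rw [hc] <;> push_cast <;> ring

-- The two outer folds compute the same running value once both see the same per-element count.
theorem cal_f_outer (X : List Int) (cnt : Int → Int)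
    (m : Int) (me : Option Int) :
    (X.foldl (fun acc e =>
        if cnt e > acc.1 then (cnt e, some e) else acc) (m, me)).1
      = X.foldl (fun best e => if cnt e > best then cnt e else best) m := by
  induction X generalizing m me with
  | nil => rfl
  | cons x X ih =>
    simp only [List.foldl_cons]
    by_cases h : cnt x > m <;> simp [h, ih]

-- ===== VERDICT (by name: the statement is the Claim_ definition above) =====
theorem cal_f_spec : Claim_equal_cal_f := by
  intro X F _
  unfold Spec_cal_f cal_f cal_f_alt
  have hA := cal_f_outer X
    (fun e => ((F.countP (fun C => decide (e ∈ C)) : Nat) : Int)) 0 none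
  simp only [cal_f_inner_count, zero_add] at *
  rw [hA]
  refine PySem.List.foldl_congr_mem _ _ _ _ (fun b e _ => ?_)
  rw [cal_f_hist_count]
  simp
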